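-- pv_equiv track=rewrite | github.com/hakankoklu/advent-of-code | advent_of_code/2020/day05.py | binary_convert
-- ===== SOURCE A (Python) =====
-- def binary_convert(text: str, zero: str, one: str) -> int:
--     degree = 0
--     digits = reversed(list(text))
--     result = 0
--     for d in digits:
--         value = 0 if d == zero else 1
--         result += value * (2 ** degree)
--         degree += 1
--     return result
-- ===== SOURCE B (Python) =====
-- def binary_convert(text: str, zero: str, one: str) -> int:
--     result = 0
--     for d in text:
--         result = result * 2 + (0 if d == zero else 1)
--     return result
-- ===== Notes on version B (the rewrite author's own statement) =====
-- stated objective: idiomatic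
-- what changed: Replaced the reversed-iteration summation with an explicit degree counter and a fresh 2**degree big-int power per character by a left-to-right Horner accumulation result = result*2 + bit.
import Mathlib
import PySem

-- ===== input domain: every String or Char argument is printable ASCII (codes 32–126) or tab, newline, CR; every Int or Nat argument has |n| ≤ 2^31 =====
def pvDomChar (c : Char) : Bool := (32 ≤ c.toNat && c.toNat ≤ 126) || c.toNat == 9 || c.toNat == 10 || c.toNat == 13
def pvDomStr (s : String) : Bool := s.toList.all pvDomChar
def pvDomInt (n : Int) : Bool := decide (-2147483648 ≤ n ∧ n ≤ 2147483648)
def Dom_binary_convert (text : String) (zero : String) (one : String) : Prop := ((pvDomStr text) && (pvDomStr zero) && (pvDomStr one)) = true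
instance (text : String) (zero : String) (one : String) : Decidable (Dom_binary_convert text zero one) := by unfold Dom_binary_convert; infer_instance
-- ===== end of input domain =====

-- B replaces A's reversed-iteration power-of-two sum with a left-to-right Horner accumulation (idiomatic; the unused parameter `one` is kept as in A).


-- ===== PORT A =====
-- literal port of A: iterate over the reversed character list with an explicit
-- degree counter, adding value * 2^degree each step
def binary_convert (text : String) (zero : String) (one : String) : Int :=
  let digits := text.toList.reverse
  let st := digits.foldl
    (fun (st : Nat × Int) d =>
      let value : Int := if String.mk [d] == zero then 0 else 1
      (st.1 + 1, st.2 + value * (2 ^ st.1 : Int)))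
    (0, 0)
  st.2

-- ===== PORT B =====
-- port of B: left-to-right Horner accumulation
def binary_convert_alt (text : String) (zero : String) (one : String) : Int :=
  text.toList.foldl
    (fun (result : Int) d => result * 2 + (if String.mk [d] == zero then 0 else 1)) 0

-- ===== PRECONDITION & SPEC =====
def Spec_binary_convert (text : String) (zero : String) (one : String) (out : Int) : Prop := out = binary_convert_alt text zero one
instance (text : String) (zero : String) (one : String) (out : Int) : Decidable (Spec_binary_convert text zero one out) := by unfold Spec_binary_convert; infer_instance

-- ===== CLAIM (what is proved, stated in full; the proofs are below) =====
def Claim_equal_binary_convert : Prop := ∀ (text : String) (zero : String) (one : String), Dom_binary_convert text zero one → Spec_binary_convert text zero one (binary_convert text zero one)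

-- ===== LEMMAS AND PROOFS =====

-- ===== VERDICT (by name: the statement is the Claim_ definition above) =====
-- Horner value of a character list
def pvHorner (zero : String) (l : List Char) : Int :=
  l.foldl (fun (result : Int) d => result * 2 + (if String.mk [d] == zero then 0 else 1)) 0

theorem pvHorner_append (zero : String) (l : List Char) (d : Char) :
    pvHorner zero (l ++ [d]) =
      2 * pvHorner zero l + (if String.mk [d] == zero then 0 else 1) := by
  simp [pvHorner, List.foldl_append]; ring

theorem afold_eq (zero : String) (rl : List Char) (deg : Nat) (res : Int) :
    (rl.foldl
      (fun (st : Nat × Int) d =>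
        (st.1 + 1, st.2 + (if String.mk [d] == zero then 0 else 1) * (2 ^ st.1 : Int)))
      (deg, res)).2 = res + (2 ^ deg : Int) * pvHorner zero rl.reverse := by
  induction rl generalizing deg res with
  | nil => simp [pvHorner]
  | cons d t ih =>
    simp only [List.foldl_cons, List.reverse_cons]
    rw [ih, pvHorner_append]
    ring

theorem binary_convert_spec : Claim_equal_binary_convert := by
  intro text zero one _
  unfold Spec_binary_convert binary_convert binary_convert_alt
  simp only []
  rw [afold_eq zero text.toList.reverse 0 0]
  simp [pvHorner]
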